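-- pv_equiv track=rewrite | github.com/junyeong-nero/ps | programmers/graph/홀짝트리.py | solution
-- ===== SOURCE A (Python) =====
-- from collections import defaultdict, deque
--
-- def solution(nodes, edges):
--     graph = defaultdict(list)
--     degree = defaultdict(int)
--
--     for u, v in edges:
--         graph[u].append(v)
--         graph[v].append(u)
--         degree[u] += 1
--         degree[v] += 1
--
--     visited = set()
--     res = [0, 0]
--
--     for start in nodes:
--         if start in visited:
--             continue
--
--         # 연결요소 수집
--         comp = []
--         q = deque([start])
--         visited.add(start)
--
--         while q:
--             cur = q.popleft()
--             comp.append(cur)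
--             for nxt in graph[cur]:
--                 if nxt not in visited:
--                     visited.add(nxt)
--                     q.append(nxt)
--
--         # 이 연결요소 내부에서만 A, cnt 계산
--         cnt = [0, 0]
--         A = {}
--
--         for u in comp:
--             A[u] = (u ^ degree[u]) & 1
--             cnt[A[u]] += 1
--
--         for u in comp:
--             a = A[u]
--             if cnt[a] == 1:
--                 res[a] += 1
--
--     return res
--
--     ### BFS
--
--     n = len(nodes)
--
--     graph = defaultdict(list)
--     for u, v in edges:
--         graph[u].append(v)
--         graph[v].append(u)
--
--     def check(head):
--
--         visited = set()
--         q = deque([head])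
--         target = (head ^ len(graph[head])) & 1
--
--         while q:
--
--             cur = q.popleft()
--             visited.add(cur)
--
--             num_child = 0
--             for node in graph[cur]:
--                 if node in visited:
--                     continue
--                 num_child += 1
--                 q.append(node)
--
--             temp = (cur ^ num_child) & 1
--             if temp != target:
--                 return None
--
--         return target
--
--     res = [0, 0]
--     for node in nodes:
--         temp = check(node)
--         if temp is not None:
--             res[temp] += 1
--
--     return res
-- ===== SOURCE B (Python) =====
-- def solution(nodes, edges):
--     degree = {}
--     for u, v in edges:
--         degree[u] = degree.get(u, 0) + 1
--         degree[v] = degree.get(v, 0) + 1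
--
--     rounds = len(nodes) + 2 * len(edges)
--     visited = set()
--     res = [0, 0]
--     for start in nodes:
--         if start in visited:
--             continue
--         # grow the component by saturating directly over the edge list:
--         # no adjacency map and no queue; repeat edge sweeps until nothing is added
--         comp = {start}
--         for _ in range(rounds):
--             before = len(comp)
--             for u, v in edges:
--                 if u in comp and v not in comp and v not in visited:
--                     comp.add(v)
--                 if v in comp and u not in comp and u not in visited:
--                     comp.add(u)
--             if len(comp) == before:
--                 break
--         visited.update(comp)
--         c0 = 0
--         c1 = 0
--         for x in comp:
--             if (x ^ degree.get(x, 0)) & 1: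
--                 c1 += 1
--             else:
--                 c0 += 1
--         if c0 == 1:
--             res[0] += 1
--         if c1 == 1:
--             res[1] += 1
--     return res
-- ===== Notes on version B (the rewrite author's own statement) =====
-- stated objective: alternative
-- what changed: Replaces A's adjacency-dict + deque BFS per component by edge-centric fixpoint saturation: each component is grown by repeated sweeps over the raw edge list until no endpoint is added, with no adjacency map, no queue and no per-component parity dict.
import Mathlib
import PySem

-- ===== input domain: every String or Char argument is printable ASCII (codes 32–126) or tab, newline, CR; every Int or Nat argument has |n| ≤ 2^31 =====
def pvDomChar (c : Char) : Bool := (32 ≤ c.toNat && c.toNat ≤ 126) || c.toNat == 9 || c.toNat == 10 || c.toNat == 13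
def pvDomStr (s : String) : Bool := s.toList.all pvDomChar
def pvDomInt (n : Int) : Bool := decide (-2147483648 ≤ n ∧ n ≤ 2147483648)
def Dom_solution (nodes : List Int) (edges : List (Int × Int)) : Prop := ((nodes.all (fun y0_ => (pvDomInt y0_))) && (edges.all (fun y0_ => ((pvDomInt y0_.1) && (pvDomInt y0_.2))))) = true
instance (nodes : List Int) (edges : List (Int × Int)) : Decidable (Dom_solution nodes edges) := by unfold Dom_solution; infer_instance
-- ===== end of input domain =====

-- B replaces A's adjacency-dict + deque BFS per component by edge-centric fixpoint
-- saturation over the raw edge list (objective: alternative); same return value proved.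


-- ===== PORT A =====

-- graph = defaultdict(list); degree = defaultdict(int); built in one loop over edges each
def buildGraphA (edges : List (Int × Int)) : PySem.Dict Int (List Int) :=
  edges.foldl (fun g e => (g.modify e.1 [] (· ++ [e.2])).modify e.2 [] (· ++ [e.1])) PySem.Dict.empty

def buildDegreeA (edges : List (Int × Int)) : PySem.Dict Int Int :=
  edges.foldl (fun d e => (d.modify e.1 0 (· + 1)).modify e.2 0 (· + 1)) PySem.Dict.empty

-- the 'while q:' BFS loop; the fuel argument only makes the loop total (each iteration
-- pops one vertex and every vertex is enqueued at most once; sufficiency is proved below)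
def bfsA (graph : PySem.Dict Int (List Int)) :
    Nat → List Int → List Int → PySem.Set Int → List Int × PySem.Set Int
  | 0, _, comp, visited => (comp, visited)
  | _ + 1, [], comp, visited => (comp, visited)
  | fuel + 1, cur :: q, comp, visited =>
      -- for nxt in graph[cur]: if nxt not in visited: visited.add(nxt); q.append(nxt)
      let s := (graph.getD cur []).foldl
        (fun (s : List Int × PySem.Set Int) nxt =>
          if nxt ∈ s.2 then s else (s.1 ++ [nxt], PySem.Set.add s.2 nxt))
        (q, visited)
      bfsA graph fuel s.1 (comp ++ [cur]) s.2

-- first loop over comp: A[u] = (u ^ degree[u]) & 1 ; cnt[A[u]] += 1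
def cntLoopA (degree : PySem.Dict Int Int) (comp : List Int) :
    PySem.Dict Int Int × Int × Int :=
  comp.foldl
    (fun (st : PySem.Dict Int Int × Int × Int) u =>
      let p := PySem.Int.band (PySem.Int.bxor u (degree.getD u 0)) 1
      (st.1.insert u p,
        if p = 0 then (st.2.1 + 1, st.2.2) else (st.2.1, st.2.2 + 1)))
    (PySem.Dict.empty, 0, 0)

-- second loop over comp: if cnt[A[u]] == 1: res[A[u]] += 1
def resLoopA (Ad : PySem.Dict Int Int) (cnt0 cnt1 : Int) (comp : List Int)
    (r : Int × Int) : Int × Int :=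
  comp.foldl
    (fun (r : Int × Int) u =>
      let a := Ad.getD u 0
      if (if a = 0 then cnt0 else cnt1) = 1 then
        (if a = 0 then (r.1 + 1, r.2) else (r.1, r.2 + 1))
      else r)
    r

def solution (nodes : List Int) (edges : List (Int × Int)) : List Int :=
  let fin := nodes.foldl
    (fun (st : PySem.Set Int × Int × Int) start =>
      if start ∈ st.1 then st
      else
        let bp := bfsA (buildGraphA edges) (1 + nodes.length + 2 * edges.length)
          [start] [] (PySem.Set.add st.1 start)
        let c := cntLoopA (buildDegreeA edges) bp.1
        (bp.2, resLoopA c.1 c.2.1 c.2.2 bp.1 st.2))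
    (PySem.Set.empty, 0, 0)
  [fin.2.1, fin.2.2]

-- ===== PORT B =====

-- degree[u] = degree.get(u, 0) + 1 ; degree[v] = degree.get(v, 0) + 1
def buildDegreeB (edges : List (Int × Int)) : PySem.Dict Int Int :=
  edges.foldl
    (fun d e =>
      let d1 := d.insert e.1 (d.getD e.1 0 + 1)
      d1.insert e.2 (d1.getD e.2 0 + 1))
    PySem.Dict.empty

-- body of one edge sweep: append reachable unvisited endpoints of one edge
def stepB (visited : PySem.Set Int) (c : List Int) (e : Int × Int) : List Int :=
  let c1 := if e.1 ∈ c ∧ e.2 ∉ c ∧ e.2 ∉ visited then c ++ [e.2] else c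
  if e.2 ∈ c1 ∧ e.1 ∉ c1 ∧ e.1 ∉ visited then c1 ++ [e.1] else c1

-- one full sweep over the edge list
def sweepB (edges : List (Int × Int)) (visited : PySem.Set Int) (comp : List Int) :
    List Int :=
  edges.foldl (stepB visited) comp

-- for _ in range(rounds): sweep; break as soon as a sweep adds nothing
def satB (edges : List (Int × Int)) (visited : PySem.Set Int) :
    Nat → List Int → List Int
  | 0, comp => comp
  | k + 1, comp =>
      let c' := sweepB edges visited comp
      if c'.length = comp.length then c' else satB edges visited k c'

-- c0/c1 counting loop over comp
def cntLoopB (degree : PySem.Dict Int Int) (comp : List Int) : Int × Int :=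
  comp.foldl
    (fun (c : Int × Int) x =>
      if PySem.Int.band (PySem.Int.bxor x (degree.getD x 0)) 1 ≠ 0 then
        (c.1, c.2 + 1)
      else (c.1 + 1, c.2))
    (0, 0)

def solution_alt (nodes : List Int) (edges : List (Int × Int)) : List Int :=
  let fin := nodes.foldl
    (fun (st : PySem.Set Int × Int × Int) start =>
      if start ∈ st.1 then st
      else
        let comp := satB edges st.1 (nodes.length + 2 * edges.length) [start]
        let c := cntLoopB (buildDegreeB edges) comp
        (PySem.Set.update st.1 comp,
          (if c.1 = 1 then st.2.1 + 1 else st.2.1),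
          (if c.2 = 1 then st.2.2 + 1 else st.2.2)))
    (PySem.Set.empty, 0, 0)
  [fin.2.1, fin.2.2]

-- ===== PRECONDITION & SPEC =====
def Spec_solution (nodes : List Int) (edges : List (Int × Int)) (out : List Int) : Prop := out = solution_alt nodes edges
instance (nodes : List Int) (edges : List (Int × Int)) (out : List Int) : Decidable (Spec_solution nodes edges out) := by unfold Spec_solution; infer_instance

-- ===== CLAIM (what is proved, stated in full; the proofs are below) =====
def Claim_equal_solution : Prop := ∀ (nodes : List Int) (edges : List (Int × Int)), Dom_solution nodes edges → Spec_solution nodes edges (solution nodes edges)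

-- ===== LEMMAS AND PROOFS =====

-- x and y are joined by some edge (in either orientation)
def pvAdj (edges : List (Int × Int)) (y z : Int) : Prop :=
  (y, z) ∈ edges ∨ (z, y) ∈ edges

-- reachability from s along edges, never stepping onto a vertex of V
inductive pvRA (edges : List (Int × Int)) (V : List Int) (s : Int) : Int → Prop
  | base : pvRA edges V s s
  | step {y z : Int} : pvRA edges V s y → pvAdj edges y z → z ∉ V → pvRA edges V s z

def pvClosed (edges : List (Int × Int)) (V : List Int) (c : List Int) : Prop :=
  ∀ e ∈ edges, (e.1 ∈ c → e.2 ∉ V → e.2 ∈ c) ∧ (e.2 ∈ c → e.1 ∉ V → e.1 ∈ c)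

lemma pvRA_congr {edges : List (Int × Int)} {V V' : List Int} {s x : Int}
    (hV : ∀ t : Int, t ∈ V ↔ t ∈ V') (h : pvRA edges V s x) : pvRA edges V' s x := by
  induction h with
  | base => exact pvRA.base
  | step _ hadj hz ih => exact pvRA.step ih hadj (fun hc => hz ((hV _).mpr hc))

lemma mem_graph_foldl (edges : List (Int × Int)) :
    ∀ (d : PySem.Dict Int (List Int)) (y z : Int),
      z ∈ (edges.foldl (fun g e => (g.modify e.1 [] (· ++ [e.2])).modify e.2 [] (· ++ [e.1])) d).getD y []
        ↔ z ∈ d.getD y [] ∨ pvAdj edges y z := by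
  induction edges with
  | nil => intro d y z; simp [pvAdj]
  | cons e es ih =>
    intro d y z
    rw [List.foldl_cons, ih]
    have hstep : z ∈ ((d.modify e.1 [] (· ++ [e.2])).modify e.2 [] (· ++ [e.1])).getD y []
        ↔ z ∈ d.getD y [] ∨ (y = e.1 ∧ z = e.2) ∨ (y = e.2 ∧ z = e.1) := by
      simp only [PySem.Dict.getD_modify]
      split_ifs <;> simp_all [List.mem_append] <;> tauto
    rw [hstep]
    simp only [pvAdj, List.mem_cons, Prod.ext_iff]
    tauto

lemma mem_buildGraphA (edges : List (Int × Int)) (y z : Int) :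
    z ∈ (buildGraphA edges).getD y [] ↔ pvAdj edges y z := by
  rw [buildGraphA, mem_graph_foldl]; simp [PySem.Dict.getD_empty]

lemma degree_foldl_eq (edges : List (Int × Int)) :
    ∀ (dA dB : PySem.Dict Int Int), (∀ u : Int, dA.getD u 0 = dB.getD u 0) →
      ∀ u : Int,
        (edges.foldl (fun d e => (d.modify e.1 0 (· + 1)).modify e.2 0 (· + 1)) dA).getD u 0
          = (edges.foldl (fun d e =>
              let d1 := d.insert e.1 (d.getD e.1 0 + 1)
              d1.insert e.2 (d1.getD e.2 0 + 1)) dB).getD u 0 := by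
  induction edges with
  | nil => intro dA dB h u; exact h u
  | cons e es ih =>
    intro dA dB h u
    rw [List.foldl_cons, List.foldl_cons]
    refine ih _ _ (fun v => ?_) u
    simp only [PySem.Dict.getD_modify, PySem.Dict.getD_insert]
    split_ifs <;> simp_all

lemma degA_eq_degB (edges : List (Int × Int)) (u : Int) :
    (buildDegreeA edges).getD u 0 = (buildDegreeB edges).getD u 0 :=
  degree_foldl_eq edges _ _ (fun _ => rfl) u

-- step lemmas
lemma stepB_prefix (V : PySem.Set Int) (c : List Int) (e : Int × Int) :
    c <+: stepB V c e := by
  simp only [stepB]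
  split_ifs
  all_goals
    first
      | exact List.prefix_refl _
      | exact List.prefix_append _ _
      | exact (List.prefix_append _ _).trans (List.prefix_append _ _)

lemma stepB_eq_self (V : PySem.Set Int) (c : List Int) (e : Int × Int)
    (h : stepB V c e = c) :
    ¬(e.1 ∈ c ∧ e.2 ∉ c ∧ e.2 ∉ V) ∧ ¬(e.2 ∈ c ∧ e.1 ∉ c ∧ e.1 ∉ V) := by
  simp only [stepB] at h
  split_ifs at h with h1 h2 h3
  · exfalso; have := congrArg List.length h; simp at this
  · exfalso; have := congrArg List.length h; simp at this
  · exfalso; have := congrArg List.length h; simp at this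
  · exact ⟨h1, h3⟩

lemma stepB_sound {edges : List (Int × Int)} {V : PySem.Set Int} {s : Int}
    {c : List Int} {e : Int × Int} (he : e ∈ edges)
    (h : ∀ x ∈ c, pvRA edges V s x) : ∀ x ∈ stepB V c e, pvRA edges V s x := by
  intro x hx
  simp only [stepB] at hx
  have hRA2 : e.1 ∈ c → e.2 ∉ V → pvRA edges V s e.2 := fun ha hb =>
    pvRA.step (h _ ha) (Or.inl (by simpa using he)) hb
  split_ifs at hx with h1 h2 h3
  · simp only [List.mem_append, List.mem_singleton] at hx
    rcases hx with (hx | hx) | hx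
    · exact h _ hx
    · subst hx; exact hRA2 h1.1 h1.2.2
    · subst hx
      rcases List.mem_append.mp h2.1 with hm | hm
      · exact pvRA.step (h _ hm) (Or.inr (by simpa using he)) h2.2.2
      · exact pvRA.step (hRA2 h1.1 h1.2.2) (Or.inr (by simpa using he)) h2.2.2
  · simp only [List.mem_append, List.mem_singleton] at hx
    rcases hx with hx | hx
    · exact h _ hx
    · subst hx; exact hRA2 h1.1 h1.2.2
  · simp only [List.mem_append, List.mem_singleton] at hx
    rcases hx with hx | hx
    · exact h _ hx
    · subst hx
      exact pvRA.step (h _ h3.1) (Or.inr (by simpa using he)) h3.2.2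
  · exact h _ hx

lemma stepB_nodup {V : PySem.Set Int} {c : List Int} {e : Int × Int}
    (h : c.Nodup) : (stepB V c e).Nodup := by
  simp only [stepB]
  split_ifs with h1 h2 h3 <;> simp_all [List.nodup_append] <;>
    first
      | tauto
      | (intro a ha hae; subst hae; simp_all)

lemma stepB_univ {V : PySem.Set Int} {c : List Int} {e : Int × Int} {x : Int}
    (hx : x ∈ stepB V c e) : x ∈ c ∨ x = e.1 ∨ x = e.2 := by
  simp only [stepB] at hx
  split_ifs at hx <;>
    first
      | (simp [List.mem_append] at hx; tauto)
      | tauto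

-- sweep lemmas
lemma sweepFold_prefix (V : PySem.Set Int) :
    ∀ (es : List (Int × Int)) (c : List Int), c <+: es.foldl (stepB V) c := by
  intro es
  induction es with
  | nil => intro c; exact List.prefix_refl c
  | cons e es ih =>
    intro c
    exact (stepB_prefix V c e).trans (ih (stepB V c e))

lemma sweepB_prefix (edges : List (Int × Int)) (V : PySem.Set Int) (c : List Int) :
    c <+: sweepB edges V c := sweepFold_prefix V edges c

lemma sweepB_eq_of_length (edges : List (Int × Int)) (V : PySem.Set Int) (c : List Int)
    (h : (sweepB edges V c).length = c.length) : sweepB edges V c = c :=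
  ((sweepB_prefix edges V c).eq_of_length h.symm).symm

lemma sweepFold_self_closed (V : PySem.Set Int) :
    ∀ (es : List (Int × Int)) (c : List Int), es.foldl (stepB V) c = c →
      ∀ e ∈ es, ¬(e.1 ∈ c ∧ e.2 ∉ c ∧ e.2 ∉ V) ∧ ¬(e.2 ∈ c ∧ e.1 ∉ c ∧ e.1 ∉ V) := by
  intro es
  induction es with
  | nil => intro c _ e he; simp at he
  | cons e es ih =>
    intro c h e' he'
    have hstep : stepB V c e = c := by
      have h1 := stepB_prefix V c e
      have h2 : stepB V c e <+: c := by
        have := sweepFold_prefix V es (stepB V c e)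
        rwa [show es.foldl (stepB V) (stepB V c e) = c from h] at this
      exact h1.eq_of_length (le_antisymm h1.length_le h2.length_le) |>.symm
    rcases List.mem_cons.mp he' with rfl | hmem
    · exact stepB_eq_self V c e' hstep
    · have h' : es.foldl (stepB V) (stepB V c e) = c := h
      rw [hstep] at h'
      exact ih c h' e' hmem

lemma sweepB_closed_of_length (edges : List (Int × Int)) (V : PySem.Set Int)
    (c : List Int) (h : (sweepB edges V c).length = c.length) :
    pvClosed edges V c := by
  intro e he
  have := sweepFold_self_closed V edges c (sweepB_eq_of_length edges V c h) e he
  constructor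
  · intro h1 h2
    by_contra h3
    exact this.1 ⟨h1, h3, h2⟩
  · intro h1 h2
    by_contra h3
    exact this.2 ⟨h1, h3, h2⟩

lemma sweepFold_sound {edges : List (Int × Int)} {V : PySem.Set Int} {s : Int} :
    ∀ (es : List (Int × Int)) (c : List Int), (∀ e ∈ es, e ∈ edges) →
      (∀ x ∈ c, pvRA edges V s x) → ∀ x ∈ es.foldl (stepB V) c, pvRA edges V s x := by
  intro es
  induction es with
  | nil => intro c _ h; exact h
  | cons e es ih =>
    intro c hsub h
    exact ih (stepB V c e) (fun e' he' => hsub e' (List.mem_cons_of_mem _ he'))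
      (stepB_sound (hsub e (List.mem_cons_self ..)) h)

lemma sweepB_sound {edges : List (Int × Int)} {V : PySem.Set Int} {s : Int}
    {c : List Int} (h : ∀ x ∈ c, pvRA edges V s x) :
    ∀ x ∈ sweepB edges V c, pvRA edges V s x :=
  sweepFold_sound edges c (fun _ he => he) h

lemma sweepFold_nodup {V : PySem.Set Int} :
    ∀ (es : List (Int × Int)) (c : List Int), c.Nodup → (es.foldl (stepB V) c).Nodup := by
  intro es
  induction es with
  | nil => intro c h; exact h
  | cons e es ih => intro c h; exact ih _ (stepB_nodup h)

lemma sweepB_nodup {edges : List (Int × Int)} {V : PySem.Set Int} {c : List Int}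
    (h : c.Nodup) : (sweepB edges V c).Nodup := sweepFold_nodup edges c h

lemma sweepFold_univ {V : PySem.Set Int} {uL : List Int} :
    ∀ (es : List (Int × Int)) (c : List Int), (∀ e ∈ es, e.1 ∈ uL ∧ e.2 ∈ uL) →
      (∀ x ∈ c, x ∈ uL) → ∀ x ∈ es.foldl (stepB V) c, x ∈ uL := by
  intro es
  induction es with
  | nil => intro c _ h; exact h
  | cons e es ih =>
    intro c hU h
    refine ih _ (fun e' he' => hU e' (List.mem_cons_of_mem _ he')) ?_
    intro x hx
    rcases stepB_univ hx with hx | rfl | rfl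
    · exact h x hx
    · exact (hU e (List.mem_cons_self ..)).1
    · exact (hU e (List.mem_cons_self ..)).2

lemma sweepB_univ {edges : List (Int × Int)} {V : PySem.Set Int} {uL : List Int}
    {c : List Int} (hU : ∀ e ∈ edges, e.1 ∈ uL ∧ e.2 ∈ uL)
    (h : ∀ x ∈ c, x ∈ uL) : ∀ x ∈ sweepB edges V c, x ∈ uL :=
  sweepFold_univ edges c hU h

-- saturation lemmas
lemma satB_prefix (edges : List (Int × Int)) (V : PySem.Set Int) :
    ∀ (k : Nat) (c : List Int), c <+: satB edges V k c := by
  intro k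
  induction k with
  | zero => intro c; exact List.prefix_refl c
  | succ k ih =>
    intro c
    simp only [satB]
    split_ifs
    · exact sweepB_prefix edges V c
    · exact (sweepB_prefix edges V c).trans (ih _)

lemma satB_sound {edges : List (Int × Int)} {V : PySem.Set Int} {s : Int} :
    ∀ (k : Nat) (c : List Int), (∀ x ∈ c, pvRA edges V s x) →
      ∀ x ∈ satB edges V k c, pvRA edges V s x := by
  intro k
  induction k with
  | zero => intro c h; exact h
  | succ k ih =>
    intro c h
    simp only [satB]
    split_ifs
    · exact sweepB_sound h
    · exact ih _ (sweepB_sound h)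

lemma satB_nodup {edges : List (Int × Int)} {V : PySem.Set Int} :
    ∀ (k : Nat) (c : List Int), c.Nodup → (satB edges V k c).Nodup := by
  intro k
  induction k with
  | zero => intro c h; exact h
  | succ k ih =>
    intro c h
    simp only [satB]
    split_ifs
    · exact sweepB_nodup h
    · exact ih _ (sweepB_nodup h)

lemma nodup_subset_length_le {c uL : List Int} (hnd : c.Nodup)
    (hsub : ∀ x ∈ c, x ∈ uL) : c.length ≤ uL.toFinset.card := by
  rw [← List.toFinset_card_of_nodup hnd]
  exact Finset.card_le_card (fun x hx => by
    rw [List.mem_toFinset] at hx ⊢; exact hsub x hx)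

lemma full_of_card_le {c uL : List Int} (hnd : c.Nodup)
    (hsub : ∀ x ∈ c, x ∈ uL) (hcard : uL.toFinset.card ≤ c.length) :
    ∀ x ∈ uL, x ∈ c := by
  have hsubf : c.toFinset ⊆ uL.toFinset := fun x hx => by
    rw [List.mem_toFinset] at hx ⊢; exact hsub x hx
  have : uL.toFinset = c.toFinset :=
    (Finset.eq_of_subset_of_card_le hsubf
      (by rwa [List.toFinset_card_of_nodup hnd])).symm
  intro x hx
  have : x ∈ c.toFinset := this ▸ List.mem_toFinset.mpr hx
  rwa [List.mem_toFinset] at this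

lemma satB_closed {edges : List (Int × Int)} {V : PySem.Set Int} {uL : List Int}
    (hU : ∀ e ∈ edges, e.1 ∈ uL ∧ e.2 ∈ uL) :
    ∀ (k : Nat) (c : List Int), c.Nodup → (∀ x ∈ c, x ∈ uL) →
      uL.toFinset.card ≤ k + c.length →
      pvClosed edges V (satB edges V k c) := by
  intro k
  induction k with
  | zero =>
    intro c hnd hsub hcard
    have hfull := full_of_card_le hnd hsub (by simpa using hcard)
    intro e he
    exact ⟨fun _ _ => hfull _ (hU e he).2, fun _ _ => hfull _ (hU e he).1⟩
  | succ k ih =>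
    intro c hnd hsub hcard
    simp only [satB]
    split_ifs with hlen
    · rw [sweepB_eq_of_length edges V c hlen]
      exact sweepB_closed_of_length edges V c hlen
    · refine ih (sweepB edges V c) (sweepB_nodup hnd) (sweepB_univ hU hsub) ?_
      have hge : c.length + 1 ≤ (sweepB edges V c).length := by
        have := (sweepB_prefix edges V c).length_le
        omega
      omega

lemma satB_mem_iff {edges : List (Int × Int)} {V : PySem.Set Int} {s : Int}
    {uL : List Int} (hU : ∀ e ∈ edges, e.1 ∈ uL ∧ e.2 ∈ uL) (hs : s ∈ uL)
    {k : Nat} (hcard : uL.toFinset.card ≤ k + 1) :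
    ∀ x : Int, x ∈ satB edges V k [s] ↔ pvRA edges V s x := by
  have hclosed := satB_closed (V := V) hU k [s] (by simp) (by simpa using hs)
    (by simpa using hcard)
  intro x
  constructor
  · exact fun hx => satB_sound k [s]
      (by intro y hy; simp at hy; subst hy; exact pvRA.base) x hx
  · intro hx
    induction hx with
    | base => exact (satB_prefix edges V k [s]).subset (by simp)
    | step hy hadj hz ihy =>
      rcases hadj with hadj | hadj
      · exact (hclosed _ hadj).1 ihy hz
      · exact (hclosed _ hadj).2 ihy hz

lemma visitFold_spec (ns : List Int) :
    ∀ (q : List Int) (vis : PySem.Set Int),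
      q.Nodup → vis.Nodup → (∀ x ∈ q, x ∈ vis) →
      (∀ x : Int, x ∈ (ns.foldl
          (fun (s : List Int × PySem.Set Int) nxt =>
            if nxt ∈ s.2 then s else (s.1 ++ [nxt], PySem.Set.add s.2 nxt)) (q, vis)).2
          ↔ x ∈ vis ∨ x ∈ ns) ∧
      (∀ x : Int, x ∈ (ns.foldl
          (fun (s : List Int × PySem.Set Int) nxt =>
            if nxt ∈ s.2 then s else (s.1 ++ [nxt], PySem.Set.add s.2 nxt)) (q, vis)).1
          ↔ x ∈ q ∨ (x ∈ ns ∧ x ∉ vis)) ∧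
      (ns.foldl
          (fun (s : List Int × PySem.Set Int) nxt =>
            if nxt ∈ s.2 then s else (s.1 ++ [nxt], PySem.Set.add s.2 nxt)) (q, vis)).1.Nodup ∧
      (ns.foldl
          (fun (s : List Int × PySem.Set Int) nxt =>
            if nxt ∈ s.2 then s else (s.1 ++ [nxt], PySem.Set.add s.2 nxt)) (q, vis)).2.Nodup ∧
      (∀ x ∈ (ns.foldl
          (fun (s : List Int × PySem.Set Int) nxt =>
            if nxt ∈ s.2 then s else (s.1 ++ [nxt], PySem.Set.add s.2 nxt)) (q, vis)).1,
        x ∈ (ns.foldl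
          (fun (s : List Int × PySem.Set Int) nxt =>
            if nxt ∈ s.2 then s else (s.1 ++ [nxt], PySem.Set.add s.2 nxt)) (q, vis)).2) := by
  induction ns with
  | nil =>
    intro q vis hq hv hqv
    refine ⟨by simp, by simp, hq, hv, hqv⟩
  | cons n ns ih =>
    intro q vis hq hv hqv
    rw [List.foldl_cons]
    by_cases hn : n ∈ vis
    · rw [if_pos hn]
      obtain ⟨a, b, c, d, e⟩ := ih q vis hq hv hqv
      refine ⟨fun x => ?_, fun x => ?_, c, d, e⟩
      · rw [a x]
        constructor
        · rintro (h | h)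
          · exact Or.inl h
          · exact Or.inr (List.mem_cons_of_mem _ h)
        · rintro (h | h)
          · exact Or.inl h
          · rcases List.mem_cons.mp h with rfl | h
            · exact Or.inl hn
            · exact Or.inr h
      · rw [b x]
        constructor
        · rintro (h | ⟨h1, h2⟩)
          · exact Or.inl h
          · exact Or.inr ⟨List.mem_cons_of_mem _ h1, h2⟩
        · rintro (h | ⟨h1, h2⟩)
          · exact Or.inl h
          · rcases List.mem_cons.mp h1 with rfl | h1
            · exact absurd hn h2
            · exact Or.inr ⟨h1, h2⟩
    · rw [if_neg hn]
      have hnq : n ∉ q := fun hmem => hn (hqv n hmem)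
      have hq' : (q ++ [n]).Nodup := by
        simp [List.nodup_append, hq]
        exact fun a ha hane => hnq (hane ▸ ha)
      have hv' : (PySem.Set.add vis n).Nodup := PySem.Set.nodup_add vis n hv
      have hqv' : ∀ x ∈ q ++ [n], x ∈ PySem.Set.add vis n := by
        intro x hx
        rw [PySem.Set.mem_add]
        rcases List.mem_append.mp hx with hx | hx
        · exact Or.inl (hqv x hx)
        · simp at hx; exact Or.inr hx
      obtain ⟨a, b, c, d, e⟩ := ih (q ++ [n]) (PySem.Set.add vis n) hq' hv' hqv'
      refine ⟨fun x => ?_, fun x => ?_, c, d, e⟩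
      · rw [a x, PySem.Set.mem_add]
        constructor
        · rintro ((h | h) | h)
          · exact Or.inl h
          · exact Or.inr (h ▸ List.mem_cons_self ..)
          · exact Or.inr (List.mem_cons_of_mem _ h)
        · rintro (h | h)
          · exact Or.inl (Or.inl h)
          · rcases List.mem_cons.mp h with rfl | h
            · exact Or.inl (Or.inr rfl)
            · exact Or.inr h
      · rw [b x]
        by_cases hxn : x = n <;>
          simp [List.mem_append, PySem.Set.mem_add, List.mem_cons, hxn, hn] <;> tauto

lemma bfsA_spec (edges : List (Int × Int)) (s : Int) (V : List Int) (uL : List Int)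
    (hU : ∀ e ∈ edges, e.1 ∈ uL ∧ e.2 ∈ uL) :
    ∀ (fuel : Nat) (queue comp : List Int) (visited : PySem.Set Int),
      (∀ x : Int, x ∈ visited ↔ x ∈ V ∨ x ∈ comp ∨ x ∈ queue) →
      comp.Nodup → queue.Nodup → (∀ x ∈ comp, x ∉ queue) →
      (∀ x ∈ comp, x ∉ V) → (∀ x ∈ queue, x ∉ V) →
      (∀ x : Int, x ∈ comp ∨ x ∈ queue → pvRA edges V s x) →
      (∀ y ∈ comp, ∀ z : Int, pvAdj edges y z → z ∈ visited) →
      visited.Nodup →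
      (∀ x : Int, x ∈ comp ∨ x ∈ queue → x ∈ uL) →
      uL.toFinset.card ≤ fuel + comp.length →
      (∀ x : Int, x ∈ (bfsA (buildGraphA edges) fuel queue comp visited).2 ↔
          x ∈ V ∨ x ∈ (bfsA (buildGraphA edges) fuel queue comp visited).1) ∧
      (bfsA (buildGraphA edges) fuel queue comp visited).1.Nodup ∧
      (∀ x ∈ (bfsA (buildGraphA edges) fuel queue comp visited).1, pvRA edges V s x) ∧
      (∀ y ∈ (bfsA (buildGraphA edges) fuel queue comp visited).1, ∀ z : Int,
          pvAdj edges y z → z ∈ (bfsA (buildGraphA edges) fuel queue comp visited).2) ∧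
      (∀ x : Int, x ∈ comp ∨ x ∈ queue →
          x ∈ (bfsA (buildGraphA edges) fuel queue comp visited).1) ∧
      (∀ x ∈ (bfsA (buildGraphA edges) fuel queue comp visited).1, x ∉ V) ∧
      (bfsA (buildGraphA edges) fuel queue comp visited).2.Nodup := by
  intro fuel
  induction fuel with
  | zero =>
    intro queue comp visited h1 h2 h3 h4 h5 h6 h7 h8 h9 h10 h11
    have hqnil : queue = [] := by
      have hnd : (comp ++ queue).Nodup := by
        rw [List.nodup_append]
        refine ⟨h2, h3, ?_⟩
        intro x hx y hy hxy
        exact h4 x hx (hxy ▸ hy)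
      have hsub : ∀ x ∈ comp ++ queue, x ∈ uL := by
        intro x hx
        rcases List.mem_append.mp hx with hx | hx
        · exact h10 x (Or.inl hx)
        · exact h10 x (Or.inr hx)
      have := nodup_subset_length_le hnd hsub
      rw [List.length_append] at this
      have : queue.length = 0 := by omega
      exact List.length_eq_zero_iff.mp this
    subst hqnil
    simp only [bfsA]
    refine ⟨fun x => ?_, h2, fun x hx => h7 x (Or.inl hx),
      fun y hy z hz => h8 y hy z hz, fun x hx => ?_, h5, h9⟩
    · rw [h1 x]; simp
    · rcases hx with hx | hx
      · exact hx
      · simp at hx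
  | succ fuel ih =>
    intro queue comp visited h1 h2 h3 h4 h5 h6 h7 h8 h9 h10 h11
    match queue with
    | [] =>
      simp only [bfsA]
      refine ⟨fun x => ?_, h2, fun x hx => h7 x (Or.inl hx),
        fun y hy z hz => h8 y hy z hz, fun x hx => ?_, h5, h9⟩
      · rw [h1 x]; simp
      · rcases hx with hx | hx
        · exact hx
        · simp at hx
    | cur :: q =>
      have hcurq : cur ∉ q := (List.nodup_cons.mp h3).1
      have hqnd : q.Nodup := (List.nodup_cons.mp h3).2
      have hqvis : ∀ x ∈ q, x ∈ visited := fun x hx =>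
        (h1 x).mpr (Or.inr (Or.inr (List.mem_cons_of_mem _ hx)))
      obtain ⟨a, b, c, d, e⟩ := visitFold_spec ((buildGraphA edges).getD cur [])
        q visited hqnd h9 hqvis
      simp only [bfsA]
      set st := (((buildGraphA edges).getD cur []).foldl
        (fun (s : List Int × PySem.Set Int) nxt =>
          if nxt ∈ s.2 then s else (s.1 ++ [nxt], PySem.Set.add s.2 nxt))
        (q, visited)) with hst
      have hnsAdj : ∀ z : Int, z ∈ (buildGraphA edges).getD cur [] ↔ pvAdj edges cur z :=
        fun z => mem_buildGraphA edges cur z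
      have hcurvis : cur ∈ visited := (h1 cur).mpr (Or.inr (Or.inr (List.mem_cons_self ..)))
      have hcurRA : pvRA edges V s cur := h7 cur (Or.inr (List.mem_cons_self ..))
      have hstq : ∀ x : Int, x ∈ st.1 ↔ x ∈ q ∨ (x ∈ (buildGraphA edges).getD cur [] ∧ x ∉ visited) := b
      -- new hypotheses for the recursive call
      have H1 : ∀ x : Int, x ∈ st.2 ↔ x ∈ V ∨ x ∈ comp ++ [cur] ∨ x ∈ st.1 := by
        intro x
        rw [a x, b x, h1 x]
        simp only [List.mem_append, List.mem_cons, List.not_mem_nil, or_false]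
        tauto
      have H2 : (comp ++ [cur]).Nodup := by
        rw [List.nodup_append]
        refine ⟨h2, by simp, ?_⟩
        intro x hx y hy hxy
        simp at hy
        subst hy
        exact h4 x hx (hxy ▸ List.mem_cons_self ..)
      have H3 : st.1.Nodup := c
      have H4 : ∀ x ∈ comp ++ [cur], x ∉ st.1 := by
        intro x hx hst1
        rcases (b x).mp hst1 with hq' | ⟨_, hnv⟩
        · rcases List.mem_append.mp hx with hx | hx
          · exact (h4 x hx) (List.mem_cons_of_mem _ hq')
          · simp at hx; subst hx; exact hcurq hq'
        · exact hnv ((h1 x).mpr (by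
            rcases List.mem_append.mp hx with hx | hx
            · exact Or.inr (Or.inl hx)
            · simp at hx; subst hx; exact Or.inr (Or.inr (List.mem_cons_self ..))))
      have H5 : ∀ x ∈ comp ++ [cur], x ∉ V := by
        intro x hx
        rcases List.mem_append.mp hx with hx | hx
        · exact h5 x hx
        · simp at hx; subst hx; exact h6 _ (List.mem_cons_self ..)
      have H6 : ∀ x ∈ st.1, x ∉ V := by
        intro x hx
        rcases (b x).mp hx with hq' | ⟨_, hnv⟩
        · exact h6 x (List.mem_cons_of_mem _ hq')
        · exact fun hv' => hnv ((h1 x).mpr (Or.inl hv'))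
      have H7 : ∀ x : Int, x ∈ comp ++ [cur] ∨ x ∈ st.1 → pvRA edges V s x := by
        intro x hx
        rcases hx with hx | hx
        · rcases List.mem_append.mp hx with hx | hx
          · exact h7 x (Or.inl hx)
          · simp at hx; subst hx; exact hcurRA
        · rcases (b x).mp hx with hq' | ⟨hns, hnv⟩
          · exact h7 x (Or.inr (List.mem_cons_of_mem _ hq'))
          · exact pvRA.step hcurRA ((hnsAdj x).mp hns)
              (fun hv' => hnv ((h1 x).mpr (Or.inl hv')))
      have H8 : ∀ y ∈ comp ++ [cur], ∀ z : Int, pvAdj edges y z → z ∈ st.2 := by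
        intro y hy z hz
        rcases List.mem_append.mp hy with hy | hy
        · exact (a z).mpr (Or.inl (h8 y hy z hz))
        · simp at hy; subst hy
          exact (a z).mpr (Or.inr ((hnsAdj z).mpr hz))
      have H9 : st.2.Nodup := d
      have H10 : ∀ x : Int, x ∈ comp ++ [cur] ∨ x ∈ st.1 → x ∈ uL := by
        intro x hx
        rcases hx with hx | hx
        · rcases List.mem_append.mp hx with hx | hx
          · exact h10 x (Or.inl hx)
          · simp at hx; subst hx; exact h10 _ (Or.inr (List.mem_cons_self ..))
        · rcases (b x).mp hx with hq' | ⟨hns, _⟩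
          · exact h10 x (Or.inr (List.mem_cons_of_mem _ hq'))
          · rcases (hnsAdj x).mp hns with hadj | hadj
            · exact (hU _ hadj).2
            · exact (hU _ hadj).1
      have H11 : uL.toFinset.card ≤ fuel + (comp ++ [cur]).length := by
        simp only [List.length_append, List.length_singleton]
        omega
      obtain ⟨C1, C2, C3, C4, C5, C6, C7⟩ :=
        ih st.1 (comp ++ [cur]) st.2 H1 H2 H3 H4 H5 H6 H7 H8 H9 H10 H11
      refine ⟨C1, C2, C3, C4, fun x hx => ?_, C6, C7⟩
      rcases hx with hx | hx
      · exact C5 x (Or.inl (List.mem_append.mpr (Or.inl hx)))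
      · rcases List.mem_cons.mp hx with rfl | hx
        · exact C5 x (Or.inl (List.mem_append.mpr (Or.inr (List.mem_cons_self ..))))
        · by_cases hxst : x ∈ st.1
          · exact C5 x (Or.inr hxst)
          · exact C5 x (Or.inr ((b x).mpr (Or.inl hx)))

lemma bfsA_mem_iff (edges : List (Int × Int)) (s : Int) (V : List Int) (uL : List Int)
    (hU : ∀ e ∈ edges, e.1 ∈ uL ∧ e.2 ∈ uL) (hs : s ∈ uL) (hV : V.Nodup)
    (hsV : s ∉ V) (fuel : Nat) (hcard : uL.toFinset.card ≤ fuel) :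
    (∀ x : Int, x ∈ (bfsA (buildGraphA edges) fuel [s] [] (PySem.Set.add V s)).1 ↔
        pvRA edges V s x) ∧
    (∀ x : Int, x ∈ (bfsA (buildGraphA edges) fuel [s] [] (PySem.Set.add V s)).2 ↔
        x ∈ V ∨ x ∈ (bfsA (buildGraphA edges) fuel [s] [] (PySem.Set.add V s)).1) ∧
    (bfsA (buildGraphA edges) fuel [s] [] (PySem.Set.add V s)).1.Nodup ∧
    (bfsA (buildGraphA edges) fuel [s] [] (PySem.Set.add V s)).2.Nodup := by
  obtain ⟨C1, C2, C3, C4, C5, C6, C7⟩ := bfsA_spec edges s V uL hU fuel [s] []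
    (PySem.Set.add V s)
    (by intro x; rw [PySem.Set.mem_add]; simp)
    (by simp) (by simp) (by simp) (by simp)
    (by intro x hx; simp at hx; subst hx; exact hsV)
    (by intro x hx; simp at hx; subst hx; exact pvRA.base)
    (by simp)
    (PySem.Set.nodup_add V s hV)
    (by intro x hx; simp at hx; subst hx; exact hs)
    (by simpa using hcard)
  refine ⟨fun x => ⟨fun hx => C3 x hx, fun hx => ?_⟩, C1, C2, C7⟩
  induction hx with
  | base => exact C5 s (Or.inr (List.mem_cons_self ..))
  | step hy hadj hz ihy =>
    rcases (C1 _).mp (C4 _ ihy _ hadj) with h | h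
    · exact absurd h hz
    · exact h

def pvPar (degree : PySem.Dict Int Int) (u : Int) : Int :=
  PySem.Int.band (PySem.Int.bxor u (degree.getD u 0)) 1

def pvPz (degree : PySem.Dict Int Int) (u : Int) : Bool :=
  decide (pvPar degree u = 0)

lemma cntFoldA_counts (degree : PySem.Dict Int Int) :
    ∀ (comp : List Int) (d : PySem.Dict Int Int) (a b : Int),
      (comp.foldl
        (fun (st : PySem.Dict Int Int × Int × Int) u =>
          let p := PySem.Int.band (PySem.Int.bxor u (degree.getD u 0)) 1
          (st.1.insert u p,
            if p = 0 then (st.2.1 + 1, st.2.2) else (st.2.1, st.2.2 + 1)))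
        (d, a, b)).2
      = (a + (comp.countP (pvPz degree) : Int),
         b + (comp.countP (fun u => !pvPz degree u) : Int)) := by
  intro comp
  induction comp with
  | nil => intro d a b; simp
  | cons u rest ih =>
    intro d a b
    rw [List.foldl_cons]
    by_cases hp : PySem.Int.band (PySem.Int.bxor u (degree.getD u 0)) 1 = 0
    · simp only [hp, if_pos]
      rw [ih]
      simp [List.countP_cons, pvPz, pvPar, hp, Prod.ext_iff] <;> push_cast <;> omega
    · simp only [if_neg hp]
      rw [ih]
      simp [List.countP_cons, pvPz, pvPar, hp, Prod.ext_iff] <;> push_cast <;> omega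
lemma cntFoldA_dict (degree : PySem.Dict Int Int) :
    ∀ (comp : List Int) (d : PySem.Dict Int Int) (a b : Int) (u : Int),
      ((comp.foldl
        (fun (st : PySem.Dict Int Int × Int × Int) u =>
          let p := PySem.Int.band (PySem.Int.bxor u (degree.getD u 0)) 1
          (st.1.insert u p,
            if p = 0 then (st.2.1 + 1, st.2.2) else (st.2.1, st.2.2 + 1)))
        (d, a, b)).1).getD u 0
      = if u ∈ comp then pvPar degree u else d.getD u 0 := by
  intro comp
  induction comp with
  | nil => intro d a b u; simp
  | cons v rest ih =>
    intro d a b u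
    rw [List.foldl_cons]
    by_cases hu : u ∈ rest
    · rw [show ((rest.foldl _ _ : PySem.Dict Int Int × Int × Int)).1.getD u 0 = _ from ih _ _ _ u]
      simp [hu]
    · rw [ih _ _ _ u]
      by_cases huv : u = v
      · subst huv
        simp [hu, PySem.Dict.getD_insert, pvPar]
      · simp [hu, huv, PySem.Dict.getD_insert]

lemma cntLoopA_eq (degree : PySem.Dict Int Int) (comp : List Int) :
    (cntLoopA degree comp).2 =
      ((comp.countP (pvPz degree) : Int), (comp.countP (fun u => !pvPz degree u) : Int))
    ∧ ∀ u ∈ comp, (cntLoopA degree comp).1.getD u 0 = pvPar degree u := by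
  constructor
  · have := cntFoldA_counts degree comp PySem.Dict.empty 0 0
    simpa [cntLoopA] using this
  · intro u hu
    have := cntFoldA_dict degree comp PySem.Dict.empty 0 0 u
    rw [cntLoopA]
    rw [this, if_pos hu]

lemma resLoopA_eq (degree : PySem.Dict Int Int) (Ad : PySem.Dict Int Int)
    (cnt0 cnt1 : Int) :
    ∀ (comp : List Int), (∀ u ∈ comp, Ad.getD u 0 = pvPar degree u) →
      ∀ (r : Int × Int),
      resLoopA Ad cnt0 cnt1 comp r =
        (r.1 + (if cnt0 = 1 then (comp.countP (pvPz degree) : Int) else 0),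
         r.2 + (if cnt1 = 1 then (comp.countP (fun u => !pvPz degree u) : Int) else 0)) := by
  intro comp
  induction comp with
  | nil => intro _ r; simp [resLoopA]
  | cons u rest ih =>
    intro hA r
    have hAu : Ad.getD u 0 = pvPar degree u := hA u (List.mem_cons_self ..)
    have hArest : ∀ v ∈ rest, Ad.getD v 0 = pvPar degree v :=
      fun v hv => hA v (List.mem_cons_of_mem _ hv)
    have ihr := ih hArest
    simp only [resLoopA] at ihr ⊢
    rw [List.foldl_cons, ihr]
    simp only [hAu]
    by_cases hp : pvPar degree u = 0 <;> by_cases hc0 : cnt0 = 1 <;>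
      by_cases hc1 : cnt1 = 1 <;>
      simp [hp, hc0, hc1, List.countP_cons, pvPz, Prod.ext_iff] <;> push_cast <;> omega

lemma cntLoopB_fold (degree : PySem.Dict Int Int) :
    ∀ (comp : List Int) (a b : Int),
      comp.foldl
        (fun (c : Int × Int) x =>
          if PySem.Int.band (PySem.Int.bxor x (degree.getD x 0)) 1 ≠ 0 then
            (c.1, c.2 + 1)
          else (c.1 + 1, c.2)) (a, b)
      = (a + (comp.countP (pvPz degree) : Int),
         b + (comp.countP (fun u => !pvPz degree u) : Int)) := by
  intro comp
  induction comp with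
  | nil => intro a b; simp
  | cons u rest ih =>
    intro a b
    rw [List.foldl_cons]
    by_cases hp : PySem.Int.band (PySem.Int.bxor u (degree.getD u 0)) 1 = 0
    · rw [if_neg (by simp [hp])]
      rw [ih]
      simp [List.countP_cons, pvPz, pvPar, hp, Prod.ext_iff] <;> push_cast <;> omega
    · rw [if_pos (by simpa using hp)]
      rw [ih]
      simp [List.countP_cons, pvPz, pvPar, hp, Prod.ext_iff] <;> push_cast <;> omega

lemma cntLoopB_eq (degree : PySem.Dict Int Int) (comp : List Int) :
    cntLoopB degree comp =
      ((comp.countP (pvPz degree) : Int), (comp.countP (fun u => !pvPz degree u) : Int)) := by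
  have := cntLoopB_fold degree comp 0 0
  simpa [cntLoopB] using this

lemma countP_eq_of_mem_iff {l1 l2 : List Int} (h1 : l1.Nodup) (h2 : l2.Nodup)
    (hm : ∀ x : Int, x ∈ l1 ↔ x ∈ l2) (p : Int → Bool) :
    l1.countP p = l2.countP p := by
  have hperm : l1.Perm l2 := by
    rw [List.perm_ext_iff_of_nodup h1 h2]
    exact hm
  exact hperm.countP_eq p


-- the two per-start loop bodies, named for the outer induction
def pvStepA (nodes : List Int) (edges : List (Int × Int))
    (st : PySem.Set Int × Int × Int) (start : Int) : PySem.Set Int × Int × Int :=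
  if start ∈ st.1 then st
  else
    let bp := bfsA (buildGraphA edges) (1 + nodes.length + 2 * edges.length)
      [start] [] (PySem.Set.add st.1 start)
    let c := cntLoopA (buildDegreeA edges) bp.1
    (bp.2, resLoopA c.1 c.2.1 c.2.2 bp.1 st.2)

def pvStepB (nodes : List Int) (edges : List (Int × Int))
    (st : PySem.Set Int × Int × Int) (start : Int) : PySem.Set Int × Int × Int :=
  if start ∈ st.1 then st
  else
    let comp := satB edges st.1 (nodes.length + 2 * edges.length) [start]
    let c := cntLoopB (buildDegreeB edges) comp
    (PySem.Set.update st.1 comp,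
      (if c.1 = 1 then st.2.1 + 1 else st.2.1),
      (if c.2 = 1 then st.2.2 + 1 else st.2.2))

lemma solution_eq_fold (nodes : List Int) (edges : List (Int × Int)) :
    solution nodes edges =
      [(nodes.foldl (pvStepA nodes edges) (PySem.Set.empty, 0, 0)).2.1,
       (nodes.foldl (pvStepA nodes edges) (PySem.Set.empty, 0, 0)).2.2] := rfl

lemma solution_alt_eq_fold (nodes : List Int) (edges : List (Int × Int)) :
    solution_alt nodes edges =
      [(nodes.foldl (pvStepB nodes edges) (PySem.Set.empty, 0, 0)).2.1,
       (nodes.foldl (pvStepB nodes edges) (PySem.Set.empty, 0, 0)).2.2] := rfl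

lemma pvEP_length (edges : List (Int × Int)) :
    (edges.flatMap (fun e => [e.1, e.2])).length = 2 * edges.length := by
  induction edges with
  | nil => simp
  | cons e es ih => simp [ih]; omega

lemma pvEP_mem {edges : List (Int × Int)} {e : Int × Int} (he : e ∈ edges) :
    e.1 ∈ edges.flatMap (fun e => [e.1, e.2]) ∧
    e.2 ∈ edges.flatMap (fun e => [e.1, e.2]) := by
  constructor <;> exact List.mem_flatMap.mpr ⟨e, he, by simp⟩

lemma pvPar_AB (edges : List (Int × Int)) (u : Int) :
    pvPar (buildDegreeA edges) u = pvPar (buildDegreeB edges) u := by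
  simp [pvPar, degA_eq_degB]

lemma pvPz_AB (edges : List (Int × Int)) (u : Int) :
    pvPz (buildDegreeA edges) u = pvPz (buildDegreeB edges) u := by
  simp [pvPz, pvPar_AB]

lemma pvOuter (nodes : List Int) (edges : List (Int × Int)) :
    ∀ (ns : List Int) (vA vB : PySem.Set Int) (r : Int × Int),
      vA.Nodup → vB.Nodup → (∀ x : Int, x ∈ vA ↔ x ∈ vB) →
      (∀ x : Int, x ∈ (ns.foldl (pvStepA nodes edges) (vA, r)).1 ↔
          x ∈ (ns.foldl (pvStepB nodes edges) (vB, r)).1) ∧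
      (ns.foldl (pvStepA nodes edges) (vA, r)).1.Nodup ∧
      (ns.foldl (pvStepB nodes edges) (vB, r)).1.Nodup ∧
      (ns.foldl (pvStepA nodes edges) (vA, r)).2 =
        (ns.foldl (pvStepB nodes edges) (vB, r)).2 := by
  intro ns
  induction ns with
  | nil => intro vA vB r hA hB hv; exact ⟨hv, hA, hB, rfl⟩
  | cons start ns ih =>
    intro vA vB r hA hB hv
    rw [List.foldl_cons, List.foldl_cons]
    by_cases hs : start ∈ vA
    · have hs' : start ∈ vB := (hv start).mp hs
      rw [show pvStepA nodes edges (vA, r) start = (vA, r) by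
            simp [pvStepA, hs],
          show pvStepB nodes edges (vB, r) start = (vB, r) by
            simp [pvStepB, hs']]
      exact ih vA vB r hA hB hv
    · have hs' : start ∉ vB := fun hc => hs ((hv start).mpr hc)
      -- the universe of vertices this component can touch
      set uL : List Int := start :: edges.flatMap (fun e => [e.1, e.2]) with huL
      have hU : ∀ e ∈ edges, e.1 ∈ uL ∧ e.2 ∈ uL := by
        intro e he
        exact ⟨List.mem_cons_of_mem _ (pvEP_mem he).1,
          List.mem_cons_of_mem _ (pvEP_mem he).2⟩
      have hcard : uL.toFinset.card ≤ 2 * edges.length + 1 := by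
        have h1 : uL.toFinset.card ≤ uL.length := List.toFinset_card_le uL
        have h2 : uL.length = (edges.flatMap (fun e => [e.1, e.2])).length + 1 := by
          simp [huL]
        rw [pvEP_length] at h2
        omega
      obtain ⟨memA, memvis, nodupA, nodupvis⟩ := bfsA_mem_iff edges start vA uL hU
        (List.mem_cons_self ..) hA hs (1 + nodes.length + 2 * edges.length)
        (by omega)
      have memB := satB_mem_iff (V := vB) hU (List.mem_cons_self ..)
        (k := nodes.length + 2 * edges.length) (by omega)
      set F := 1 + nodes.length + 2 * edges.length with hF
      set compA := (bfsA (buildGraphA edges) F [start] [] (PySem.Set.add vA start)).1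
        with hcompA
      set compB := satB edges vB (nodes.length + 2 * edges.length) [start] with hcompB
      have nodupB : compB.Nodup := satB_nodup _ [start] (by simp)
      have hmemAB : ∀ x : Int, x ∈ compA ↔ x ∈ compB := by
        intro x
        rw [memA x, memB x]
        exact ⟨pvRA_congr hv, pvRA_congr (fun t => (hv t).symm)⟩
      -- counts agree
      have hcntA := cntLoopA_eq (buildDegreeA edges) compA
      have hcntB := cntLoopB_eq (buildDegreeB edges) compB
      have hcount0 : compA.countP (pvPz (buildDegreeA edges)) =
          compB.countP (pvPz (buildDegreeB edges)) := by
        rw [countP_eq_of_mem_iff nodupA nodupB hmemAB]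
        exact List.countP_congr (fun x _ => by rw [pvPz_AB edges x])
      have hcount1 : compA.countP (fun u => !pvPz (buildDegreeA edges) u) =
          compB.countP (fun u => !pvPz (buildDegreeB edges) u) := by
        rw [countP_eq_of_mem_iff nodupA nodupB hmemAB]
        exact List.countP_congr (fun x _ => by rw [pvPz_AB edges x])
      -- the A-side result pair equals the B-side result pair
      have hres :
          resLoopA (cntLoopA (buildDegreeA edges) compA).1
            (cntLoopA (buildDegreeA edges) compA).2.1
            (cntLoopA (buildDegreeA edges) compA).2.2 compA r =
          ((if (cntLoopB (buildDegreeB edges) compB).1 = 1 then r.1 + 1 else r.1),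
           (if (cntLoopB (buildDegreeB edges) compB).2 = 1 then r.2 + 1 else r.2)) := by
        rw [resLoopA_eq (buildDegreeA edges) _ _ _ compA (cntLoopA_eq _ compA).2 r]
        rw [hcntB]
        have h0 := congrArg Prod.fst hcntA.1
        have h1 := congrArg Prod.snd hcntA.1
        simp only at h0 h1
        rw [h0, h1, hcount0, hcount1]
        simp only [Prod.ext_iff]
        constructor <;> split_ifs with h <;> omega
      have hstepA : pvStepA nodes edges (vA, r) start =
          ((bfsA (buildGraphA edges) F [start] [] (PySem.Set.add vA start)).2,
           ((if (cntLoopB (buildDegreeB edges) compB).1 = 1 then r.1 + 1 else r.1),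
            (if (cntLoopB (buildDegreeB edges) compB).2 = 1 then r.2 + 1 else r.2))) := by
        simp only [pvStepA, if_neg hs]
        rw [← hF, ← hcompA, hres]
      have hstepB : pvStepB nodes edges (vB, r) start =
          (PySem.Set.update vB compB,
           ((if (cntLoopB (buildDegreeB edges) compB).1 = 1 then r.1 + 1 else r.1),
            (if (cntLoopB (buildDegreeB edges) compB).2 = 1 then r.2 + 1 else r.2))) := by
        simp only [pvStepB, if_neg hs']
        rw [← hcompB]
      rw [hstepA, hstepB]
      have hBnd : (PySem.Set.update vB compB).Nodup := PySem.Set.nodup_update vB compB hB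
      have hv' : ∀ x : Int,
          x ∈ (bfsA (buildGraphA edges) F [start] [] (PySem.Set.add vA start)).2 ↔
          x ∈ PySem.Set.update vB compB := by
        intro x
        rw [memvis x, PySem.Set.mem_update]
        constructor
        · rintro (h | h)
          · exact Or.inl ((hv x).mp h)
          · exact Or.inr ((hmemAB x).mp h)
        · rintro (h | h)
          · exact Or.inl ((hv x).mpr h)
          · exact Or.inr ((hmemAB x).mpr h)
      exact ih _ _ _ nodupvis hBnd hv'

-- ===== VERDICT (by name: the statement is the Claim_ definition above) =====
theorem solution_spec : Claim_equal_solution := by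
  intro nodes edges _
  unfold Spec_solution
  rw [solution_eq_fold, solution_alt_eq_fold]
  obtain ⟨_, _, _, h⟩ := pvOuter nodes edges nodes PySem.Set.empty PySem.Set.empty
    (0, 0) (by simp [PySem.Set.empty]) (by simp [PySem.Set.empty]) (fun x => Iff.rfl)
  rw [h]
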